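-- pv_equiv track=rewrite | github.com/stsmall/abc_scripts2 | TODO/pop1_block_sims.py | jSFSfolder
-- ===== SOURCE A (Python) =====
-- def jSFSfolder(MutCountsDict,l1):
-- # works out the number of freq types in each pop. The SFS is folded to the minor allele in pop1:
-- # makes tuple pairs of equivalent mut types:
--     tuplist=[]
--     for i in range(l1+1):
--         tuplist.append(tuple(sorted([i,l1-i])))
--     myNewCounter={}
-- # set() removes duplicates
--     for i in set(tuplist):
--         if i[0] == i[1]:
--             myNewCounter.update({i[0]:MutCountsDict[i[0]]})
--         else:
--             myNewCounter.update({i[0]:MutCountsDict[i[0]]+MutCountsDict[i[1]]})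
-- # turns the bSFS into a tuple, removes monomorphic sites:
--     sortdkeys = sorted(myNewCounter.keys())
--     del sortdkeys[0]
--     blockconf=tuple([myNewCounter[i] for i in sortdkeys])
--     return blockconf
-- ===== SOURCE B (Python) =====
-- def jSFSfolder(MutCountsDict, l1):
--     # Build the folded spectrum directly: class j of the folded SFS pairs j with its
--     # complement l1-j, for j in 0..l1//2; then drop the monomorphic class j=0.
--     # No pair list, no set dedup, no key sort.
--     folded = []
--     for j in range(l1 // 2 + 1):
--         if j == l1 - j:
--             folded.append(MutCountsDict[j])
--         else:
--             folded.append(MutCountsDict[j] + MutCountsDict[l1 - j])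
--     folded.pop(0)
--     return tuple(folded)
-- ===== Notes on version B (the rewrite author's own statement) =====
-- stated objective: simpler
-- what changed: B builds the folded spectrum directly by pairing each class j in 0..l1//2 with its complement l1-j and then dropping the monomorphic class, eliminating A's pair-list construction, set deduplication and key sort.
import Mathlib
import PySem

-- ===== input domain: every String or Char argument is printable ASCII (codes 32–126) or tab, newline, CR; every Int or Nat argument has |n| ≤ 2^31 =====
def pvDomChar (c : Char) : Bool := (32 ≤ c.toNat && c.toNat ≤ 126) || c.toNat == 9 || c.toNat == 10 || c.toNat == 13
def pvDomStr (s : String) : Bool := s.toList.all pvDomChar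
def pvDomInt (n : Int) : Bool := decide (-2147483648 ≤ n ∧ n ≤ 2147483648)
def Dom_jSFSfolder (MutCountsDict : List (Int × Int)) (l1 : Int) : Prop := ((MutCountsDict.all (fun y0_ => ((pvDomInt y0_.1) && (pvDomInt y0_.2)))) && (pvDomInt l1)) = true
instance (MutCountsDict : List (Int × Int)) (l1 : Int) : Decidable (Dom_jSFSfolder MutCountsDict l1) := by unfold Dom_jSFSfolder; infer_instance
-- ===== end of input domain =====

-- B builds the folded SFS directly over the classes 0..l1//2 and drops class 0 (simpler: no
-- pair list, no set dedup, no key sort). Equivalence is about the return value; neither side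
-- mutates its arguments.

-- ===== PORT A =====
-- tuple(sorted([i, j])) for a two-element list: exact
def pySort2 (i j : Int) : Int × Int := if i ≤ j then (i, j) else (j, i)

def jSFSfolder (MutCountsDict : List (Int × Int)) (l1 : Int) : List Int :=
  let D := PySem.Dict.mk MutCountsDict
  -- tuplist = []; for i in range(l1+1): tuplist.append(tuple(sorted([i, l1-i])))
  let tuplist := (PySem.List.pyRange 0 (l1 + 1) 1).foldl
      (fun acc i => acc ++ [pySort2 i (l1 - i)]) []
  -- for i in set(tuplist): … (the dict is only looked up afterwards, so set order is immaterial)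
  -- MutCountsDict[k] ported as getD _ 0; Pre_ excludes the KeyError inputs
  let myNewCounter := (PySem.Set.ofList tuplist).foldl
      (fun d p => if p.1 = p.2 then d.insert p.1 (D.getD p.1 0)
                  else d.insert p.1 (D.getD p.1 0 + D.getD p.2 0)) PySem.Dict.empty
  -- sortdkeys = sorted(myNewCounter.keys()); del sortdkeys[0] (IndexError on empty: Pre_ excludes l1 < 0)
  let sortdkeys := (PySem.List.sorted myNewCounter.keys (fun x => x) false).drop 1
  sortdkeys.map (fun i => myNewCounter.getD i 0)

-- ===== PORT B =====
def jSFSfolder_alt (MutCountsDict : List (Int × Int)) (l1 : Int) : List Int :=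
  let D := PySem.Dict.mk MutCountsDict
  -- folded = []; for j in range(l1//2 + 1): folded.append(...); MutCountsDict[k] via getD 0 (Pre_ excludes KeyError)
  let folded := (PySem.List.pyRange 0 (PySem.Int.floordiv l1 2 + 1) 1).foldl
      (fun acc j => acc ++
        [if j = l1 - j then D.getD j 0 else D.getD j 0 + D.getD (l1 - j) 0]) []
  -- folded.pop(0); return tuple(folded)
  match PySem.List.pop? folded 0 with
  | none => []        -- IndexError on the empty list (l1 < 0); Pre_ excludes it
  | some (_, rest) => rest

-- ===== PRECONDITION & SPEC =====
-- Pre_ = exactly where Python A returns: l1 ≥ 0 (else del sortdkeys[0] is an IndexError) and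
-- every key 0..l1 present (else MutCountsDict[·] is a KeyError).
-- (the length bound is implied by the key coverage — a dict containing keys 0..l1 has at least
-- l1+1 entries — it is stated first only so the condition decides quickly for huge l1)
def Pre_jSFSfolder (MutCountsDict : List (Int × Int)) (l1 : Int) : Prop :=
  0 ≤ l1 ∧ l1 < (MutCountsDict.length : Int) ∧
    ∀ j ∈ PySem.List.pyRange 0 (l1 + 1) 1, (PySem.Dict.mk MutCountsDict).contains j = true
instance (MutCountsDict : List (Int × Int)) (l1 : Int) : Decidable (Pre_jSFSfolder MutCountsDict l1) := by unfold Pre_jSFSfolder; infer_instance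
def pvWitness_jSFSfolder : (List (Int × Int)) × Int := ([(0, 3), (1, 4), (2, 5), (3, 6)], 3)

def Spec_jSFSfolder (MutCountsDict : List (Int × Int)) (l1 : Int) (out : List Int) : Prop := out = jSFSfolder_alt MutCountsDict l1
instance (MutCountsDict : List (Int × Int)) (l1 : Int) (out : List Int) : Decidable (Spec_jSFSfolder MutCountsDict l1 out) := by unfold Spec_jSFSfolder; infer_instance

-- ===== CLAIM (what is proved, stated in full; the proofs are below) =====
def Claim_equal_jSFSfolder : Prop := ∀ (MutCountsDict : List (Int × Int)) (l1 : Int), Dom_jSFSfolder MutCountsDict l1 → Pre_jSFSfolder MutCountsDict l1 → Spec_jSFSfolder MutCountsDict l1 (jSFSfolder MutCountsDict l1)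

-- ===== LEMMAS AND PROOFS =====


theorem jSFSfolder_main (MutCountsDict : List (Int × Int)) (l1 : Int) (h0 : 0 ≤ l1) :
    jSFSfolder MutCountsDict l1 = jSFSfolder_alt MutCountsDict l1 := by
  unfold jSFSfolder jSFSfolder_alt
  have hk2 : PySem.Int.floordiv l1 2 = l1 / 2 :=
    PySem.Int.floordiv_eq_ediv_of_pos (by norm_num)
  rw [hk2]
  set D := PySem.Dict.mk MutCountsDict with hD
  set k := l1 / 2 with hk
  have hkl : 2 * k ≤ l1 ∧ l1 ≤ 2 * k + 1 ∧ 0 ≤ k ∧ k ≤ l1 := by omega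
  -- the value attached to minor-allele class i
  set W : Int → Int := fun i =>
    if i = l1 - i then D.getD i 0 else D.getD i 0 + D.getD (l1 - i) 0 with hW
  -- Step 1: the appended tuplist is a map
  rw [PySem.List.foldl_append_singleton_eq_map]
  simp only [List.nil_append]
  -- Step 2: the set of pairs is the map over the minor range
  have hsplit : PySem.List.pyRange 0 (l1 + 1) 1 =
      PySem.List.pyRange 0 (k + 1) 1 ++ PySem.List.pyRange (k + 1) (l1 + 1) 1 :=
    PySem.List.pyRange_one_append 0 (k + 1) (l1 + 1) (by omega) (by omega)
  have h1 : (PySem.List.pyRange 0 (k + 1) 1).map (fun i => pySort2 i (l1 - i)) =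
      (PySem.List.pyRange 0 (k + 1) 1).map (fun i => (i, l1 - i)) := by
    apply List.map_congr_left
    intro i hi
    rw [PySem.List.mem_pyRange_one] at hi
    simp [pySort2, show i ≤ l1 - i by omega]
  have hnodup : ((PySem.List.pyRange 0 (k + 1) 1).map (fun i => (i, l1 - i))).Nodup := by
    refine List.Nodup.map ?_ (PySem.List.nodup_pyRange_one 0 (k + 1))
    intro a b hab
    simpa using congrArg Prod.fst hab
  have hset : PySem.Set.ofList ((PySem.List.pyRange 0 (l1 + 1) 1).map (fun i => pySort2 i (l1 - i)))
      = (PySem.List.pyRange 0 (k + 1) 1).map (fun i => (i, l1 - i)) := by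
    rw [hsplit, List.map_append, h1, PySem.Set.ofList_append]
    have hofl := PySem.Set.ofList_eq_self_of_nodup _ hnodup
    rw [hofl]
    rw [PySem.Set.update_eq_append_filter]
    have hfil : (PySem.Set.ofList ((PySem.List.pyRange (k + 1) (l1 + 1) 1).map
        (fun i => pySort2 i (l1 - i)))).filter
        (fun y => !(PySem.Set.contains ((PySem.List.pyRange 0 (k + 1) 1).map (fun i => (i, l1 - i))) y)) = [] := by
      rw [List.filter_eq_nil_iff]
      intro p hp
      rw [PySem.Set.mem_ofList] at hp
      obtain ⟨i, hi, hpi⟩ := List.mem_map.mp hp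
      rw [PySem.List.mem_pyRange_one] at hi
      have hgt : ¬ i ≤ l1 - i := by omega
      simp only [pySort2, if_neg hgt] at hpi
      subst hpi
      simp only [Bool.not_eq_true', PySem.Set.contains_eq_listContains]
      simp [PySem.List.mem_pyRange_one]
      omega
    rw [hfil, List.append_nil]
  rw [hset]
  rw [List.foldl_map]
  have hfold : (PySem.List.pyRange 0 (k + 1) 1).foldl
      (fun d i => (fun (d : PySem.Dict Int Int) (p : Int × Int) =>
        if p.1 = p.2 then d.insert p.1 (D.getD p.1 0)
        else d.insert p.1 (D.getD p.1 0 + D.getD p.2 0)) d (i, l1 - i)) PySem.Dict.empty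
      = (PySem.List.pyRange 0 (k + 1) 1).foldl (fun d i => d.insert i (W i)) PySem.Dict.empty := by
    refine PySem.List.foldl_congr_mem _ _ _ _ ?_
    intro d i _
    simp only [hW]
    by_cases h : i = l1 - i
    · rw [if_pos h, if_pos h]
    · rw [if_neg h, if_neg h]
  rw [hfold]
  set C := (PySem.List.pyRange 0 (k + 1) 1).foldl (fun d i => d.insert i (W i)) PySem.Dict.empty with hC
  have hCitems : C.items = (PySem.List.pyRange 0 (k + 1) 1).map (fun i => (i, W i)) := by
    rw [hC]
    have := PySem.Dict.items_foldl_insert_fresh (l := PySem.List.pyRange 0 (k + 1) 1)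
      (k := fun i => i) (v := W) (d := PySem.Dict.empty)
      (by intro a _; simp [PySem.Dict.contains_empty])
      (by simpa using PySem.List.nodup_pyRange_one 0 (k + 1))
    simpa using this
  have hCkeys : C.keys = PySem.List.pyRange 0 (k + 1) 1 := by
    simp only [PySem.Dict.keys, hCitems, List.map_map]
    simp [Function.comp_def]
  have hCknd : C.keys.Nodup := by rw [hCkeys]; exact PySem.List.nodup_pyRange_one 0 (k + 1)
  have hsortedkeys : PySem.List.sorted C.keys (fun x => x) false = PySem.List.pyRange 0 (k + 1) 1 := by
    rw [hCkeys]
    exact PySem.List.sorted_eq_self_of_pairwise _ _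
      ((PySem.List.pairwise_lt_pyRange_one 0 (k + 1)).imp le_of_lt)
  rw [hsortedkeys]
  rw [PySem.List.foldl_append_singleton_eq_map]
  simp only [List.nil_append]
  rw [PySem.List.pyRange_one_cons (by omega : (0:Int) < k + 1)]
  simp only [List.map_cons, List.drop_succ_cons, List.drop_zero, PySem.List.pop?_zero_cons]
  apply List.map_congr_left
  intro i hi
  rw [PySem.List.mem_pyRange_one] at hi
  have himem : (i, W i) ∈ C.items := by
    rw [hCitems]
    exact List.mem_map.mpr ⟨i, PySem.List.mem_pyRange_one.mpr ⟨by omega, by omega⟩, rfl⟩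
  exact PySem.Dict.getD_of_mem_items C himem hCknd 0

-- ===== VERDICT (by name: the statement is the Claim_ definition above) =====
theorem jSFSfolder_spec : Claim_equal_jSFSfolder := by
  intro M l1 _ hpre
  exact jSFSfolder_main M l1 hpre.1
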